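-- pv_equiv track=rewrite | github.com/mirrash7/Basketball | tactical_view_converter/tactical_view_converter.py | _apply_median_filtering
-- ===== SOURCE A (Python) =====
-- def _apply_median_filtering(positions):
--     """
--     Apply median filtering to remove outliers.
--
--     Args:
--         positions: List of recent positions
--
--     Returns:
--         tuple: Median filtered position
--     """
--     if len(positions) < 3:
--         return positions[-1] if positions else (0, 0)
--
--     # Separate x and y coordinates
--     x_coords = [pos[0] for pos in positions]
--     y_coords = [pos[1] for pos in positions]
--
--     # Calculate median
--     x_coords.sort()
--     y_coords.sort()
--     median_x = x_coords[len(x_coords) // 2]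
--     median_y = y_coords[len(y_coords) // 2]
--
--     return (median_x, median_y)
-- ===== SOURCE B (Python) =====
-- def _quickselect(lst, k):
--     """Value that would sit at index k of sorted(lst), by partitioning."""
--     pivot = lst[0]
--     lows = [v for v in lst if v < pivot]
--     if k < len(lows):
--         return _quickselect(lows, k)
--     eq_count = len([v for v in lst if v == pivot])
--     if k < len(lows) + eq_count:
--         return pivot
--     highs = [v for v in lst if v > pivot]
--     return _quickselect(highs, k - len(lows) - eq_count)
--
--
-- def _apply_median_filtering(positions):
--     if len(positions) < 3:
--         return positions[-1] if positions else (0, 0)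
--     k = len(positions) // 2
--     return (_quickselect([pos[0] for pos in positions], k),
--             _quickselect([pos[1] for pos in positions], k))
-- ===== Notes on version B (the rewrite author's own statement) =====
-- stated objective: alternative
-- what changed: Replaces sorting both coordinate lists and indexing [len//2] with a three-way-partition quickselect that finds the upper-median element of each coordinate list directly.
import Mathlib
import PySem

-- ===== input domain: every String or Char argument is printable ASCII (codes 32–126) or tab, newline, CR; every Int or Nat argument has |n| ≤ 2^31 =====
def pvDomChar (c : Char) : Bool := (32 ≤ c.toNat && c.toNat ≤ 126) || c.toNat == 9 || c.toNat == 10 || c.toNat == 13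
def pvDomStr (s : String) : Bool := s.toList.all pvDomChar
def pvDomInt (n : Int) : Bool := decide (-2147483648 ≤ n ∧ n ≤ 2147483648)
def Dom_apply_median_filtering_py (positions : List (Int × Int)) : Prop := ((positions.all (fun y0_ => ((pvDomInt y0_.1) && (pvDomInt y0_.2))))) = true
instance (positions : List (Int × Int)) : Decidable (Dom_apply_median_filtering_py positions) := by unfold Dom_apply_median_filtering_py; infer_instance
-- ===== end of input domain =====

-- B replaces sort-then-index-[len//2] with a three-way-partition quickselect that finds the upper-median element of each coordinate list directly (a different algorithm; no speed claim).

-- ===== PORT A =====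
def apply_median_filtering_py (positions : List (Int × Int)) : Int × Int :=
  if positions.length < 3 then
    if positions.isEmpty then (0, 0)
    else (PySem.List.pyGet? positions (-1)).getD (0, 0)
  else
    let x_coords := positions.map (fun pos => pos.1)
    let y_coords := positions.map (fun pos => pos.2)
    let xs := PySem.List.sorted x_coords (fun x => x) false
    let ys := PySem.List.sorted y_coords (fun x => x) false
    let median_x := (PySem.List.pyGet? xs (PySem.Int.floordiv (xs.length : Int) 2)).getD 0
    let median_y := (PySem.List.pyGet? ys (PySem.Int.floordiv (ys.length : Int) 2)).getD 0
    (median_x, median_y)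

-- ===== PORT B =====
-- quickselect: value that would sit at index k of sorted(lst) (Source B's _quickselect; lst[0] on [] is unreachable, ported as 0)
def pvQuickselect : List Int → Nat → Int
  | [], _ => 0
  | pivot :: rest, k =>
    let lst := pivot :: rest
    let lows := lst.filter (fun v => decide (v < pivot))
    if k < lows.length then pvQuickselect lows k
    else
      let eqCount := (lst.filter (fun v => decide (v = pivot))).length
      if k < lows.length + eqCount then pivot
      else
        let highs := lst.filter (fun v => decide (pivot < v))
        pvQuickselect highs (k - lows.length - eqCount)
termination_by lst _ => lst.length
decreasing_by
  · simp only [List.filter_cons, lt_self_iff_false, decide_false, Bool.false_eq_true,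
      if_false, List.length_cons]
    have := List.length_filter_le (fun v => decide (v < pivot)) rest
    omega
  · simp only [List.filter_cons, lt_self_iff_false, decide_false, Bool.false_eq_true,
      if_false, List.length_cons]
    have := List.length_filter_le (fun v => decide (pivot < v)) rest
    omega

def apply_median_filtering_py_alt (positions : List (Int × Int)) : Int × Int :=
  if positions.length < 3 then
    if positions.isEmpty then (0, 0)
    else (PySem.List.pyGet? positions (-1)).getD (0, 0)
  else
    let k := positions.length / 2
    (pvQuickselect (positions.map (fun pos => pos.1)) k,
     pvQuickselect (positions.map (fun pos => pos.2)) k)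

-- ===== PRECONDITION & SPEC =====
def Spec_apply_median_filtering_py (positions : List (Int × Int)) (out : Int × Int) : Prop := out = apply_median_filtering_py_alt positions
instance (positions : List (Int × Int)) (out : Int × Int) : Decidable (Spec_apply_median_filtering_py positions out) := by unfold Spec_apply_median_filtering_py; infer_instance

-- ===== CLAIM (what is proved, stated in full; the proofs are below) =====
def Claim_equal_apply_median_filtering_py : Prop := ∀ (positions : List (Int × Int)), Dom_apply_median_filtering_py positions → Spec_apply_median_filtering_py positions (apply_median_filtering_py positions)

-- ===== LEMMAS AND PROOFS =====

-- the three filters by comparison with p partition l (as a permutation)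
lemma pvPartPerm (p : Int) : ∀ (l : List Int),
    (l.filter (fun v => decide (v < p)) ++ l.filter (fun v => decide (v = p)) ++ l.filter (fun v => decide (p < v))).Perm l := by
  intro l
  induction l with
  | nil => simp
  | cons x t ih =>
    rcases lt_trichotomy x p with h | h | h
    · have e1 : (decide (x < p)) = true := by simp [h]
      have e2 : (decide (x = p)) = false := by simp [ne_of_lt h]
      have e3 : (decide (p < x)) = false := by simp [not_lt.mpr h.le]
      simp only [List.filter_cons, e1, e2, e3, if_true, Bool.false_eq_true, if_false]
      exact List.Perm.cons x ih
    · subst h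
      have f1 : (x :: t).filter (fun v => decide (v < x)) = t.filter (fun v => decide (v < x)) := by
        simp [List.filter_cons]
      have f2 : (x :: t).filter (fun v => decide (v = x)) = x :: t.filter (fun v => decide (v = x)) := by
        simp [List.filter_cons]
      have f3 : (x :: t).filter (fun v => decide (x < v)) = t.filter (fun v => decide (x < v)) := by
        simp [List.filter_cons]
      rw [f1, f2, f3, List.append_assoc, List.cons_append]
      refine List.perm_middle.trans ?_
      exact List.Perm.cons x (by rw [← List.append_assoc]; exact ih)
    · have e1 : (decide (x < p)) = false := by simp [not_lt.mpr h.le]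
      have e2 : (decide (x = p)) = false := by simp [(ne_of_lt h).symm]
      have e3 : (decide (p < x)) = true := by simp [h]
      simp only [List.filter_cons, e1, e2, e3, if_true, Bool.false_eq_true, if_false]
      refine List.perm_middle.trans ?_
      exact List.Perm.cons x ih

-- quickselect computes the k-th element of the sorted list
lemma pvQuickselect_eq_sorted : ∀ (n : Nat) (lst : List Int) (k : Nat), lst.length ≤ n → k < lst.length →
    pvQuickselect lst k = (PySem.List.sorted lst (fun x => x) false).getD k 0 := by
  intro n
  induction n with
  | zero => intro lst k hn hk; omega
  | succ n ih =>
    intro lst k hn hk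
    match lst with
    | [] => simp at hk
    | pivot :: rest =>
      rw [pvQuickselect]
      set L := List.filter (fun v => decide (v < pivot)) (pivot :: rest) with hL
      set E := List.filter (fun v => decide (v = pivot)) (pivot :: rest) with hE
      set H := List.filter (fun v => decide (pivot < v)) (pivot :: rest) with hH
      set SL := PySem.List.sorted L (fun x => x) false with hSL
      set SH := PySem.List.sorted H (fun x => x) false with hSH
      have hpermL : SL.Perm L := PySem.List.sorted_perm ..
      have hpermH : SH.Perm H := PySem.List.sorted_perm ..
      have hperm : (SL ++ E ++ SH).Perm (pivot :: rest) :=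
        ((hpermL.append (List.Perm.refl E)).append hpermH).trans (pvPartPerm pivot (pivot :: rest))
      have hmemSL : ∀ a ∈ SL, a < pivot := by
        intro a ha
        have := hpermL.mem_iff.mp ha
        simpa using (List.mem_filter.mp this).2
      have hmemE : ∀ a ∈ E, a = pivot := by
        intro a ha; simpa using (List.mem_filter.mp ha).2
      have hmemSH : ∀ a ∈ SH, pivot < a := by
        intro a ha
        have := hpermH.mem_iff.mp ha
        simpa using (List.mem_filter.mp this).2
      have hsorted : (SL ++ E ++ SH).Pairwise (· ≤ ·) := by
        rw [List.append_assoc]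
        rw [List.pairwise_append]
        refine ⟨PySem.List.sorted_pairwise .., ?_, ?_⟩
        · rw [List.pairwise_append]
          refine ⟨List.pairwise_of_forall_mem_list (fun a ha b hb => by
            rw [hmemE a ha, hmemE b hb]), PySem.List.sorted_pairwise .., ?_⟩
          intro a ha b hb
          have := hmemE a ha; have := hmemSH b hb; omega
        · intro a ha b hb
          have ha' := hmemSL a ha
          rcases List.mem_append.mp hb with hb | hb
          · have := hmemE b hb; omega
          · have := hmemSH b hb; omega
      have hsortedEq : PySem.List.sorted (pivot :: rest) (fun x => x) false = SL ++ E ++ SH :=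
        PySem.List.sorted_id_eq_of_perm_of_pairwise (pivot :: rest) (SL ++ E ++ SH) hperm hsorted
      have hlen : SL.length + E.length + SH.length = (pivot :: rest).length := by
        have := hperm.length_eq
        simp only [List.length_append] at this
        omega
      have hLlen : SL.length = L.length := hpermL.length_eq
      have hHlen : SH.length = H.length := hpermH.length_eq
      have hLrest : L.length ≤ rest.length := by
        have h0 : L = rest.filter (fun v => decide (v < pivot)) := by
          rw [hL, List.filter_cons]; simp
        have h0' : L.length = (rest.filter (fun v => decide (v < pivot))).length := by rw [h0]
        have := List.length_filter_le (fun v => decide (v < pivot)) rest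
        omega
      have hHrest : H.length ≤ rest.length := by
        have h0 : H = rest.filter (fun v => decide (pivot < v)) := by
          rw [hH, List.filter_cons]; simp
        have h0' : H.length = (rest.filter (fun v => decide (pivot < v))).length := by rw [h0]
        have := List.length_filter_le (fun v => decide (pivot < v)) rest
        omega
      rw [hsortedEq, List.append_assoc]
      by_cases h1 : k < L.length
      · rw [if_pos h1]
        rw [List.getD_append _ _ _ _ (by omega)]
        exact ih L k (by simp at hn; omega) h1
      · rw [if_neg h1]
        simp only []
        by_cases h2 : k < L.length + E.length
        · rw [if_pos h2]
          rw [List.getD_append_right _ _ _ _ (by omega)]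
          rw [List.getD_append _ _ _ _ (by omega)]
          
          have hkE : k - SL.length < E.length := by omega
          rw [List.getD_eq_getElem _ _ hkE]
          exact (hmemE _ (List.getElem_mem hkE)).symm
        · rw [if_neg h2]
          rw [List.getD_append_right _ _ _ _ (by omega)]
          rw [List.getD_append_right _ _ _ _ (by omega)]
          have hkH : k - L.length - E.length < H.length := by
            simp only [List.length_cons] at hk hlen
            omega
          have := ih H (k - L.length - E.length) (by simp at hn; omega) hkH
          rw [show k - SL.length - E.length = k - L.length - E.length from by omega]
          exact this

-- A's sorted-index expression equals quickselect
lemma pvMedianEq (cs : List Int) (h3 : 3 ≤ cs.length) :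
    (PySem.List.pyGet? (PySem.List.sorted cs (fun x => x) false)
      (PySem.Int.floordiv ((PySem.List.sorted cs (fun x => x) false).length : Int) 2)).getD 0
      = pvQuickselect cs (cs.length / 2) := by
  set S := PySem.List.sorted cs (fun x => x) false with hS
  have hlenS : S.length = cs.length := PySem.List.length_sorted ..
  have hfd : PySem.Int.floordiv ((S.length : Int)) 2 = ((S.length / 2 : Nat) : Int) := by
    exact_mod_cast PySem.Int.floordiv_natCast S.length 2
  rw [hfd, PySem.List.pyGet?_natCast]
  have hk : cs.length / 2 < cs.length := by omega
  rw [pvQuickselect_eq_sorted cs.length cs (cs.length / 2) (le_refl _) hk]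
  rw [hlenS, List.getD_eq_getElem?_getD]

-- ===== VERDICT (by name: the statement is the Claim_ definition above) =====
theorem apply_median_filtering_py_spec : Claim_equal_apply_median_filtering_py := by
  intro positions _
  unfold Spec_apply_median_filtering_py apply_median_filtering_py apply_median_filtering_py_alt
  by_cases h : positions.length < 3
  · rw [if_pos h, if_pos h]
  · rw [if_neg h, if_neg h]
    have h3 : 3 ≤ positions.length := by omega
    have e1 := pvMedianEq (positions.map (fun pos => pos.1)) (by simpa using h3)
    have e2 := pvMedianEq (positions.map (fun pos => pos.2)) (by simpa using h3)
    simp only [List.length_map] at e1 e2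
    simp only [Prod.mk.injEq]
    exact ⟨e1, e2⟩
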